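-- pv_equiv track=rewrite | github.com/sambeard/PASS | Ruleset_module.py | comebacklossfocus
-- ===== SOURCE A (Python) =====
-- def comebacklossfocus(gamecourselist, homeaway):
--     differencelist = []
--     focusgoals = 0
--     othergoals = 0
--     #Get the goals for the focus team and other team
--     for eventidx, event in enumerate(gamecourselist):
--         if ((event['event'] == 'regular goal') and (event['team'] == homeaway)) or ((event['event'] == 'penalty goal') and (event['team'] == homeaway)) or ((event['event'] == 'own goal') and (event['team'] != homeaway)):
--             if 'player' in event:
--                 focusgoals += 1
--             else:
--                 focusgoals += 2
--         if ((event['event'] == 'regular goal') and (event['team'] != homeaway)) or ((event['event'] == 'penalty goal') and (event['team'] != homeaway)) or ((event['event'] == 'own goal') and (event['team'] == homeaway)):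
--             if 'player' in event:
--                 othergoals += 1
--             else:
--                 othergoals += 2
--         #And see how much more (or less) goals the other team has made
--         differencelist.append(othergoals - focusgoals)
--     try:
--         maxdifference = max(differencelist)
--     except ValueError:
--         return False
--     #If the difference at one point was 3 goals or more in favor of the other team, it opens up the possibility for a comeback
--     if maxdifference >= 3:
--         #Get the differences after the maximum difference
--         maxidx = differencelist.index(max(differencelist))
--         afterdifference = differencelist[maxidx + 1:]
--         #If there were changes to the score after the maximum difference
--         if len(afterdifference) > 0:
--             #And the difference was at one point one goal or less, there was a comeback
--             if min(afterdifference) <= 1: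
--                 return True
--             else:
--                 return False
--         else:
--             return False
--     else:
--         return False
-- ===== SOURCE B (Python) =====
-- def comebacklossfocus(gamecourselist, homeaway):
--     # One pass, no difference list: track the running max deficit and the
--     # minimum difference strictly after the first position achieving it.
--     focusgoals = 0
--     othergoals = 0
--     max_diff = None
--     min_after = None
--     for event in gamecourselist:
--         scoring = event['event'] in ('regular goal', 'penalty goal')
--         own = event['event'] == 'own goal'
--         points = 1 if 'player' in event else 2
--         if (scoring and event['team'] == homeaway) or (own and event['team'] != homeaway):
--             focusgoals += points
--         if (scoring and event['team'] != homeaway) or (own and event['team'] == homeaway):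
--             othergoals += points
--         d = othergoals - focusgoals
--         if max_diff is None or d > max_diff:
--             max_diff = d
--             min_after = None
--         elif min_after is None or d < min_after:
--             min_after = d
--     return max_diff is not None and max_diff >= 3 and min_after is not None and min_after <= 1
-- ===== Notes on version B (the rewrite author's own statement) =====
-- stated objective: simpler
-- what changed: B replaces A's materialised difference list plus max/index/slice/min post-processing by a single pass that maintains the running maximum deficit and the minimum difference seen strictly after its first occurrence, in O(1) extra space.
import Mathlib
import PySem

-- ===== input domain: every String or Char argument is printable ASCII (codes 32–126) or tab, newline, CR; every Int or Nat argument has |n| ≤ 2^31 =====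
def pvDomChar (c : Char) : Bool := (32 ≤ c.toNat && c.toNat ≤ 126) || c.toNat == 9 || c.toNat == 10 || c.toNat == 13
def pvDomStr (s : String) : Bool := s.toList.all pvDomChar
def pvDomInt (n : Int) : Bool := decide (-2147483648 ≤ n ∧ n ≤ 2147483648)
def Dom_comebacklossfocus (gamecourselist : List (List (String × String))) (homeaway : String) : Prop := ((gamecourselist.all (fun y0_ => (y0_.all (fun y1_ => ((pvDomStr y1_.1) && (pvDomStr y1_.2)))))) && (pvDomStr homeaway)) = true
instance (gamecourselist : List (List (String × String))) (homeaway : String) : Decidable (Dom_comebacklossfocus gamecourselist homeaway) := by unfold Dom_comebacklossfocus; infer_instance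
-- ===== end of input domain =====

-- B: one pass keeping the running max deficit and the min difference after its first occurrence,
-- instead of A's materialised difference list with max/index/slice/min post-processing (simpler, O(1) space).

-- ===== PORT A =====
-- A's loop body: update the goal counters and append the running difference.
def comebacklossfocusBody (homeaway : String) (st : Int × Int × List Int)
    (event : List (String × String)) : Int × Int × List Int :=
  let focusgoals := st.1
  let othergoals := st.2.1
  let differencelist := st.2.2
  let e := (event.lookup "event").getD ""
  let t := (event.lookup "team").getD ""
  let focusgoals :=
    if (e == "regular goal" && t == homeaway) || (e == "penalty goal" && t == homeaway) ||
       (e == "own goal" && t != homeaway) then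
      (if (event.lookup "player").isSome then focusgoals + 1 else focusgoals + 2)
    else focusgoals
  let othergoals :=
    if (e == "regular goal" && t != homeaway) || (e == "penalty goal" && t != homeaway) ||
       (e == "own goal" && t == homeaway) then
      (if (event.lookup "player").isSome then othergoals + 1 else othergoals + 2)
    else othergoals
  (focusgoals, othergoals, differencelist ++ [othergoals - focusgoals])

-- A builds the full difference list, then uses max / index / slice / min on it.
def comebacklossfocus (gamecourselist : List (List (String × String))) (homeaway : String) : Bool :=
  let st := gamecourselist.foldl (comebacklossfocusBody homeaway) (0, 0, [])
  let differencelist := st.2.2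
  match PySem.List.max? differencelist (fun x => x) with
  | none => false      -- max([]) raises ValueError; A catches it and returns False
  | some maxdifference =>
    if maxdifference ≥ 3 then
      match PySem.List.index? differencelist maxdifference with
      | none => false  -- unreachable: the maximum is in the list
      | some maxidx =>
        let afterdifference := PySem.List.slice differencelist (some ((maxidx : Int) + 1)) none
        if afterdifference.length > 0 then
          match PySem.List.min? afterdifference (fun x => x) with
          | none => false  -- unreachable: the slice is nonempty
          | some m => decide (m ≤ 1)
        else false
    else false

-- ===== PORT B =====
-- B's loop body: update the counters, then the running (max_diff, min_after) pair.
def comebacklossfocusAltBody (homeaway : String) (st : Int × Int × Option Int × Option Int)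
    (event : List (String × String)) : Int × Int × Option Int × Option Int :=
  let focusgoals := st.1
  let othergoals := st.2.1
  let maxDiff := st.2.2.1
  let minAfter := st.2.2.2
  let ev := (event.lookup "event").getD ""
  let scoring := ev == "regular goal" || ev == "penalty goal"
  let own := ev == "own goal"
  let t := (event.lookup "team").getD ""
  let points : Int := if (event.lookup "player").isSome then 1 else 2
  let focusgoals :=
    if (scoring && t == homeaway) || (own && t != homeaway) then focusgoals + points else focusgoals
  let othergoals :=
    if (scoring && t != homeaway) || (own && t == homeaway) then othergoals + points else othergoals
  let d := othergoals - focusgoals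
  match maxDiff with
  | none => (focusgoals, othergoals, some d, none)
  | some m =>
    if d > m then (focusgoals, othergoals, some d, none)
    else
      match minAfter with
      | none => (focusgoals, othergoals, some m, some d)
      | some x => (focusgoals, othergoals, some m, some (if d < x then d else x))

def comebacklossfocus_alt (gamecourselist : List (List (String × String))) (homeaway : String) : Bool :=
  let st := gamecourselist.foldl (comebacklossfocusAltBody homeaway) (0, 0, none, none)
  match st.2.2.1, st.2.2.2 with
  | some maxDiff, some minAfter => decide (maxDiff ≥ 3) && decide (minAfter ≤ 1)
  | _, _ => false

-- ===== PRECONDITION & SPEC =====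
-- Pre_ excludes exactly the inputs on which A raises KeyError: an event dict missing key "event",
-- or a goal-type event missing key "team" (for other event types "team" is never accessed).
def Pre_comebacklossfocus (gamecourselist : List (List (String × String))) (homeaway : String) : Prop :=
  ∀ event ∈ gamecourselist, (event.lookup "event").isSome ∧
    (((event.lookup "event").getD "" = "regular goal" ∨ (event.lookup "event").getD "" = "penalty goal" ∨
      (event.lookup "event").getD "" = "own goal") → (event.lookup "team").isSome)
instance (gamecourselist : List (List (String × String))) (homeaway : String) : Decidable (Pre_comebacklossfocus gamecourselist homeaway) := by unfold Pre_comebacklossfocus; infer_instance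

def pvWitness_comebacklossfocus : (List (List (String × String))) × String :=
  ([[("event", "regular goal"), ("team", "away")], [("event", "own goal"), ("team", "home"), ("player", "p")]], "home")

def Spec_comebacklossfocus (gamecourselist : List (List (String × String))) (homeaway : String) (out : Bool) : Prop := out = comebacklossfocus_alt gamecourselist homeaway
instance (gamecourselist : List (List (String × String))) (homeaway : String) (out : Bool) : Decidable (Spec_comebacklossfocus gamecourselist homeaway out) := by unfold Spec_comebacklossfocus; infer_instance

-- ===== CLAIM (what is proved, stated in full; the proofs are below) =====
def Claim_equal_comebacklossfocus : Prop := ∀ (gamecourselist : List (List (String × String))) (homeaway : String), Dom_comebacklossfocus gamecourselist homeaway → Pre_comebacklossfocus gamecourselist homeaway → Spec_comebacklossfocus gamecourselist homeaway (comebacklossfocus gamecourselist homeaway)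

-- ===== LEMMAS AND PROOFS =====

-- Proof-only helpers: the (shared) goal-counter update and the stream of running differences.
def pvUpd (homeaway : String) (fg og : Int) (event : List (String × String)) : Int × Int :=
  let e := (event.lookup "event").getD ""
  let t := (event.lookup "team").getD ""
  let fg' :=
    if (e == "regular goal" && t == homeaway) || (e == "penalty goal" && t == homeaway) ||
       (e == "own goal" && t != homeaway) then
      (if (event.lookup "player").isSome then fg + 1 else fg + 2)
    else fg
  let og' :=
    if (e == "regular goal" && t != homeaway) || (e == "penalty goal" && t != homeaway) ||
       (e == "own goal" && t == homeaway) then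
      (if (event.lookup "player").isSome then og + 1 else og + 2)
    else og
  (fg', og')

def pvDiffs (homeaway : String) (g : List (List (String × String))) (fg og : Int) : List Int :=
  match g with
  | [] => []
  | event :: rest =>
    let p := pvUpd homeaway fg og event
    (p.2 - p.1) :: pvDiffs homeaway rest p.1 p.2

-- B's max/min-after update as a function of the new difference only.
def pvMM (mm : Option Int × Option Int) (d : Int) : Option Int × Option Int :=
  match mm.1 with
  | none => (some d, none)
  | some m =>
    if d > m then (some d, none)
    else
      match mm.2 with
      | none => (some m, some d)
      | some x => (some m, some (if d < x then d else x))

-- A's min-after-first-max value computed from the difference list, exactly as the A port does.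
def pvMinAfter (ds : List Int) : Option Int :=
  match PySem.List.max? ds (fun x => x) with
  | none => none
  | some m =>
    match PySem.List.index? ds m with
    | none => none
    | some i => PySem.List.min? (PySem.List.slice ds (some ((i : Int) + 1)) none) (fun x => x)

theorem bodyA_eq (homeaway : String) (fg og : Int) (ds : List Int) (event : List (String × String)) :
    comebacklossfocusBody homeaway (fg, og, ds) event =
      ((pvUpd homeaway fg og event).1, (pvUpd homeaway fg og event).2,
       ds ++ [(pvUpd homeaway fg og event).2 - (pvUpd homeaway fg og event).1]) := by
  simp [comebacklossfocusBody, pvUpd]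

theorem bodyB_eq (homeaway : String) (fg og : Int) (md ma : Option Int) (event : List (String × String)) :
    comebacklossfocusAltBody homeaway (fg, og, md, ma) event =
      ((pvUpd homeaway fg og event).1, (pvUpd homeaway fg og event).2,
       pvMM (md, ma) ((pvUpd homeaway fg og event).2 - (pvUpd homeaway fg og event).1)) := by
  simp only [comebacklossfocusAltBody, pvUpd, pvMM]
  cases md <;> cases ma <;>
  cases h1 : (event.lookup "event").getD "" == "regular goal" <;>
  cases h2 : (event.lookup "event").getD "" == "penalty goal" <;>
  cases h3 : (event.lookup "event").getD "" == "own goal" <;>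
  cases h4 : (event.lookup "team").getD "" == homeaway <;>
  cases h5 : (event.lookup "player").isSome <;>
    simp [h4, bne] <;> split_ifs <;> simp

theorem foldA_diffs (homeaway : String) (g : List (List (String × String))) :
    ∀ (fg og : Int) (ds : List Int),
    (g.foldl (comebacklossfocusBody homeaway) (fg, og, ds)).2.2 = ds ++ pvDiffs homeaway g fg og := by
  induction g with
  | nil => intro fg og ds; simp [pvDiffs]
  | cons ev rest ih =>
    intro fg og ds
    simp only [List.foldl_cons, bodyA_eq, pvDiffs]
    rw [ih]
    simp

theorem foldB_mm (homeaway : String) (g : List (List (String × String))) :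
    ∀ (fg og : Int) (md ma : Option Int),
    (g.foldl (comebacklossfocusAltBody homeaway) (fg, og, md, ma)).2.2 =
      (pvDiffs homeaway g fg og).foldl pvMM (md, ma) := by
  induction g with
  | nil => intro fg og md ma; simp [pvDiffs]
  | cons ev rest ih =>
    intro fg og md ma
    simp only [List.foldl_cons, bodyB_eq, pvDiffs]
    rcases h : pvMM (md, ma) ((pvUpd homeaway fg og ev).2 - (pvUpd homeaway fg og ev).1) with ⟨md', ma'⟩
    rw [ih]

theorem max?_id_append_singleton (ds : List Int) (d : Int) :
    PySem.List.max? (ds ++ [d]) (fun x => x) =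
      some (match PySem.List.max? ds (fun x => x) with | none => d | some m => max m d) := by
  cases ds with
  | nil =>
    have h0 : PySem.List.max? ([] : List Int) (fun x => x) = none :=
      (PySem.List.max?_eq_none_iff _ _).2 rfl
    simp [PySem.List.max?_id_cons]
    rw [h0]
  | cons x t => simp [PySem.List.max?_id_cons, List.foldl_append]

theorem min?_id_append_singleton (ds : List Int) (d : Int) :
    PySem.List.min? (ds ++ [d]) (fun x => x) =
      some (match PySem.List.min? ds (fun x => x) with | none => d | some m => min m d) := by
  cases ds with
  | nil =>
    have h0 : PySem.List.min? ([] : List Int) (fun x => x) = none :=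
      (PySem.List.min?_eq_none_iff _ _).2 rfl
    simp [PySem.List.min?_id_cons]
    rw [h0]
  | cons x t => simp [PySem.List.min?_id_cons, List.foldl_append]

-- The fold of pvMM over a difference list computes A's (max, min-after-first-max) pair.
theorem pvMM_spec (ds : List Int) :
    ds.foldl pvMM (none, none) = (PySem.List.max? ds (fun x => x), pvMinAfter ds) := by
  induction ds using List.reverseRecOn with
  | nil => simp [pvMinAfter, PySem.List.max?]
  | append_singleton ds d ih =>
    rw [List.foldl_append, List.foldl_cons, List.foldl_nil, ih]
    cases hm : PySem.List.max? ds (fun x => x) with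
    | none =>
      have hds : ds = [] := (PySem.List.max?_eq_none_iff _ _).1 hm
      subst hds
      simp [pvMinAfter, pvMM, PySem.List.max?_id_cons, PySem.List.slice_from_one]
      exact ((PySem.List.min?_eq_none_iff _ _).2 rfl).symm
    | some m =>
      have hmem : m ∈ ds := PySem.List.max?_mem hm
      have hmax : ∀ y ∈ ds, y ≤ m := fun y hy => PySem.List.max?_isMax hm y hy
      by_cases hd : d > m
      · -- new strict maximum at the end: min-after resets to none
        have hnotin : d ∉ ds := fun hmem' => absurd (hmax d hmem') (by omega)
        have hidx : PySem.List.index? (ds ++ [d]) d = some ds.length :=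
          PySem.List.index?_append_singleton_self _ _ hnotin
        have hmax' : max m d = d := by omega
        simp only [pvMinAfter, max?_id_append_singleton, hm, hmax', hidx, pvMM, hd, if_pos]
        have hsl : PySem.List.slice (ds ++ [d]) (some ((ds.length : Int) + 1)) none = [] := by
          rw [show ((ds.length : Int) + 1) = ((ds.length + 1 : Nat) : Int) by push_cast; ring,
            PySem.List.slice_from_natCast]
          simp
        rw [hsl, (PySem.List.min?_eq_none_iff _ _).2 rfl]
      · -- maximum unchanged; d joins the "after" slice
        have hmax' : max m d = m := by omega
        rcases hidx0 : PySem.List.index? ds m with _ | i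
        · exfalso
          have hS := (PySem.List.index?_isSome_iff ds m).2 hmem
          rw [hidx0] at hS
          simp at hS
        · have hidx : PySem.List.index? (ds ++ [d]) m = some i :=
            by rw [PySem.List.index?_append_of_mem _ hmem, hidx0]
          have hilt : i < ds.length := by
            obtain ⟨hk, _, _⟩ := PySem.List.getElem_of_index?_eq_some hidx0
            exact hk
          have hslice : ∀ (l : List Int), PySem.List.slice l (some ((i : Int) + 1)) none = l.drop (i + 1) := by
            intro l
            rw [show ((i : Int) + 1) = ((i + 1 : Nat) : Int) by push_cast; ring,
              PySem.List.slice_from_natCast]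
          have hdropapp : (ds ++ [d]).drop (i + 1) = ds.drop (i + 1) ++ [d] :=
            List.drop_append_of_le_length (by omega)
          simp only [pvMinAfter, max?_id_append_singleton, hm, hmax', hidx, hidx0, hslice,
            hdropapp, min?_id_append_singleton, pvMM]
          rw [if_neg hd]
          cases hmn : PySem.List.min? (List.drop (i + 1) ds) (fun x => x) with
          | none => rfl
          | some x =>
            simp only [Prod.mk.injEq, Option.some.injEq, true_and]
            rw [min_def]
            split_ifs <;> omega

-- A's final four-way case analysis equals B's final match on (max, min-after).
theorem finish_eq (ds : List Int) :
    (match PySem.List.max? ds (fun x => x) with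
     | none => false
     | some maxdifference =>
       if maxdifference ≥ 3 then
         match PySem.List.index? ds maxdifference with
         | none => false
         | some maxidx =>
           let afterdifference := PySem.List.slice ds (some ((maxidx : Int) + 1)) none
           if afterdifference.length > 0 then
             match PySem.List.min? afterdifference (fun x => x) with
             | none => false
             | some m => decide (m ≤ 1)
           else false
       else false)
    = (match PySem.List.max? ds (fun x => x), pvMinAfter ds with
       | some maxDiff, some minAfter => decide (maxDiff ≥ 3) && decide (minAfter ≤ 1)
       | _, _ => false) := by
  cases hm : PySem.List.max? ds (fun x => x) with
  | none => simp [hm]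
  | some m =>
    simp only [pvMinAfter, hm]
    cases hi : PySem.List.index? ds m with
    | none => split_ifs <;> rfl
    | some i =>
      cases hmn : PySem.List.min? (PySem.List.slice ds (some ((i : Int) + 1)) none) (fun x => x) with
      | none =>
        have : PySem.List.slice ds (some ((i : Int) + 1)) none = [] :=
          (PySem.List.min?_eq_none_iff _ _).1 hmn
        have h0 : PySem.List.min? ([] : List Int) (fun x => x) = none :=
          (PySem.List.min?_eq_none_iff _ _).2 rfl
        simp [this, h0]
      | some mn =>
        have hne : PySem.List.slice ds (some ((i : Int) + 1)) none ≠ [] := by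
          intro h0
          rw [h0] at hmn
          rw [(PySem.List.min?_eq_none_iff _ _).2 rfl] at hmn
          simp at hmn
        have hlen : (PySem.List.slice ds (some ((i : Int) + 1)) none).length > 0 :=
          List.length_pos_of_ne_nil hne
        by_cases h3 : m ≥ 3 <;> simp [h3, hlen, hmn]

-- ===== VERDICT (by name: the statement is the Claim_ definition above) =====
theorem comebacklossfocus_spec : Claim_equal_comebacklossfocus := by
  intro gamecourselist homeaway _ _
  unfold Spec_comebacklossfocus comebacklossfocus comebacklossfocus_alt
  simp only [foldA_diffs, foldB_mm, pvMM_spec, List.nil_append]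
  exact finish_eq (pvDiffs homeaway gamecourselist 0 0)
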